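-- pv_equiv track=rewrite | github.com/gokbeykeskin/GTU-ASSIGNMENTS | CSE321/HW3/count_str_1901042631.py | countSubstr
-- ===== SOURCE A (Python) =====
-- def countSubstr(string, start, end):
--     count = 0
--     for i in range(len(string)):
--         substr = ''
--         for j in range(i, len(string)):
--             substr += string[j]
--             if substr[0] == start and substr[len(substr) - 1] == end:
--                 count += 1
--     return count
-- ===== SOURCE B (Python) =====
-- def countSubstr(string, start, end):
--     starts = 0
--     count = 0
--     for c in string:
--         if c == start:
--             starts += 1
--         if c == end:
--             count += starts
--     return count
-- ===== Notes on version B (the rewrite author's own statement) =====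
-- stated objective: faster
-- what changed: Replaced the quadratic double loop that materialises every substring with a single pass keeping a running count of start characters and adding it at each end character.
import Mathlib
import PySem

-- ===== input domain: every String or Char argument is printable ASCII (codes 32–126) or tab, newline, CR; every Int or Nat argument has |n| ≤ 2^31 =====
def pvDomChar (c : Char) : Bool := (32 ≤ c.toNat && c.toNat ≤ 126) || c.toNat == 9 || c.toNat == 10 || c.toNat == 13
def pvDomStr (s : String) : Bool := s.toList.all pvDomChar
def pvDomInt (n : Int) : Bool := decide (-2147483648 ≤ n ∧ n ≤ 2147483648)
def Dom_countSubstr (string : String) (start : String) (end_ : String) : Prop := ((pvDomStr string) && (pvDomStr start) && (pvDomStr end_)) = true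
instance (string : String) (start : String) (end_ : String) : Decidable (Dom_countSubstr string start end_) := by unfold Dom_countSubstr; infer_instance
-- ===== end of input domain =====

-- B replaces A's quadratic substring-building double loop by one pass keeping a running count
-- of start-character positions, added at each end character (objective: faster).


-- ===== PORT A =====
-- inner loop: 'for j in range(i, len(string)): substr += string[j]; if …: count += 1';
-- 'rest' is the characters string[j], string[j+1], … still to be appended.
def pyAInner (start end_ : String) (substr : List Char) (rest : List Char) (count : Int) : Int :=
  match rest with
  | [] => count
  | c :: rest' =>
    let substr' := substr ++ [c]
    let count' :=
      if String.mk [PySem.List.pyGetD substr' 0 ' '] = start ∧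
         String.mk [PySem.List.pyGetD substr' ((substr'.length : Int) - 1) ' '] = end_
      then count + 1 else count
    pyAInner start end_ substr' rest' count'

-- outer loop: 'for i in range(len(string))'; at index i the inner loop sees string[i:], so we
-- recurse over suffixes of the character list.
def pyAOuter (start end_ : String) (suffix : List Char) (count : Int) : Int :=
  match suffix with
  | [] => count
  | _ :: tail => pyAOuter start end_ tail (pyAInner start end_ [] suffix count)

def countSubstr (string : String) (start : String) (end_ : String) : Int :=
  pyAOuter start end_ string.toList 0

-- ===== PORT B =====
def countSubstr_alt (string : String) (start : String) (end_ : String) : Int :=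
  (string.toList.foldl
    (fun (st : Int × Int) c =>
      let starts := st.1 + (if String.mk [c] = start then 1 else 0)
      let count := st.2 + (if String.mk [c] = end_ then starts else 0)
      (starts, count))
    (0, 0)).2

-- ===== PRECONDITION & SPEC =====
def Spec_countSubstr (string : String) (start : String) (end_ : String) (out : Int) : Prop := out = countSubstr_alt string start end_
instance (string : String) (start : String) (end_ : String) (out : Int) : Decidable (Spec_countSubstr string start end_ out) := by unfold Spec_countSubstr; infer_instance

-- ===== CLAIM (what is proved, stated in full; the proofs are below) =====
def Claim_equal_countSubstr : Prop := ∀ (string : String) (start : String) (end_ : String), Dom_countSubstr string start end_ → Spec_countSubstr string start end_ (countSubstr string start end_)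

-- ===== LEMMAS AND PROOFS =====

-- number of characters equal (as one-char strings) to e
def cntE (e : String) : List Char → Int
  | [] => 0
  | c :: t => (if String.mk [c] = e then 1 else 0) + cntE e t

-- pure-recursive characterisation of A's count
def fA (s e : String) : List Char → Int
  | [] => 0
  | c :: rest => (if String.mk [c] = s then cntE e (c :: rest) else 0) + fA s e rest

theorem getD_last_append (xs : List Char) (c : Char) :
    PySem.List.pyGetD (xs ++ [c]) (((xs ++ [c]).length : Int) - 1) ' ' = c := by
  have h1 : (((xs ++ [c]).length : Int) - 1) = (xs.length : Int) := by simp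
  rw [h1, PySem.List.pyGetD_natCast]
  simp

theorem pyAInner_nonempty (s e : String) (h : Char) :
    ∀ (rest tl : List Char) (count : Int),
      pyAInner s e (h :: tl) rest count =
        count + (if String.mk [h] = s then cntE e rest else 0) := by
  intro rest
  induction rest with
  | nil => intro tl count; simp [pyAInner, cntE]
  | cons c rest' ih =>
    intro tl count
    have hfirst : PySem.List.pyGetD ((h :: tl) ++ [c]) 0 ' ' = h := by
      simp [PySem.List.pyGetD_zero_cons]
    have hlast := getD_last_append (h :: tl) c
    simp only [pyAInner, hfirst, hlast]
    simp only [List.cons_append]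
    rw [ih (tl ++ [c])]
    simp only [cntE]
    by_cases hs : String.mk [h] = s <;> by_cases he : String.mk [c] = e <;>
      simp [hs, he] <;> ring

theorem pyAInner_nil (s e : String) (c : Char) (rest : List Char) (count : Int) :
    pyAInner s e [] (c :: rest) count =
      count + (if String.mk [c] = s then cntE e (c :: rest) else 0) := by
  have hfirst : PySem.List.pyGetD (([] : List Char) ++ [c]) 0 ' ' = c := by
    simp [PySem.List.pyGetD_zero_cons]
  have hlast := getD_last_append ([] : List Char) c
  simp only [pyAInner, hfirst, hlast]
  simp only [List.nil_append]
  rw [pyAInner_nonempty s e c rest []]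
  simp only [cntE]
  by_cases hs : String.mk [c] = s <;> by_cases he : String.mk [c] = e <;>
    simp [hs, he] <;> split_ifs <;> first | ring | (exfalso; simp_all)

theorem pyAOuter_eq (s e : String) :
    ∀ (suffix : List Char) (count : Int),
      pyAOuter s e suffix count = count + fA s e suffix := by
  intro suffix
  induction suffix with
  | nil => intro count; simp [pyAOuter, fA]
  | cons c tail ih =>
    intro count
    simp only [pyAOuter]
    rw [pyAInner_nil, ih]
    simp only [fA]
    ring

theorem foldB_eq (s e : String) :
    ∀ (cs : List Char) (k count : Int),
      (cs.foldl
        (fun (st : Int × Int) c =>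
          let starts := st.1 + (if String.mk [c] = s then 1 else 0)
          let cnt := st.2 + (if String.mk [c] = e then starts else 0)
          (starts, cnt))
        (k, count)).2 = count + fA s e cs + k * cntE e cs := by
  intro cs
  induction cs with
  | nil => intro k count; simp [fA, cntE]
  | cons c cs' ih =>
    intro k count
    simp only [List.foldl_cons]
    rw [ih]
    simp only [fA, cntE]
    by_cases hs : String.mk [c] = s <;> by_cases he : String.mk [c] = e <;>
      simp [hs, he] <;> split_ifs <;> ring

-- ===== VERDICT (by name: the statement is the Claim_ definition above) =====
theorem countSubstr_spec : Claim_equal_countSubstr := by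
  intro string start end_ _
  unfold Spec_countSubstr countSubstr countSubstr_alt
  rw [pyAOuter_eq, foldB_eq]
  ring
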